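-- pv_equiv track=rewrite | github.com/gregland76/Translate-Chrome-Extension | create_icons.py | french_flag
-- ===== SOURCE A (Python) =====
-- def french_flag(size: int) -> list:
--     """Drapeau tricolore français : bleu | blanc | rouge."""
--     pixels = []
--     third = size // 3
--     for y in range(size):
--         for x in range(size):
--             if x < third:
--                 pixels.append((0, 35, 149))     # Bleu  #002395
--             elif x < 2 * third:
--                 pixels.append((255, 255, 255))  # Blanc
--             else:
--                 pixels.append((237, 41, 57))    # Rouge #ED2939
--     return pixels
-- ===== SOURCE B (Python) =====
-- def french_flag(size: int) -> list:
--     """Drapeau tricolore français : bleu | blanc | rouge."""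
--     third = size // 3
--     row = ([(0, 35, 149)] * third
--            + [(255, 255, 255)] * third
--            + [(237, 41, 57)] * (size - 2 * third))
--     return row * size
-- ===== Notes on version B (the rewrite author's own statement) =====
-- stated objective: simpler
-- what changed: Builds one row by list repetition/concatenation and replicates it size times instead of classifying every (y,x) pixel in nested loops.
import Mathlib
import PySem

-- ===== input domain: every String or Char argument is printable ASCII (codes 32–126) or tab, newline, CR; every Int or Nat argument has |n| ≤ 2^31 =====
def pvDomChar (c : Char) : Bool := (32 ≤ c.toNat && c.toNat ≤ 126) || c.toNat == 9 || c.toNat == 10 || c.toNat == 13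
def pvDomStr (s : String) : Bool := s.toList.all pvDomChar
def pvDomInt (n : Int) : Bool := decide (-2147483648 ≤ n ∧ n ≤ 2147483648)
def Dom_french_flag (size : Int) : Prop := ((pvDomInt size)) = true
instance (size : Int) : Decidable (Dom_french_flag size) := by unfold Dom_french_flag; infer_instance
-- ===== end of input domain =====

-- B builds one flag row by list repetition/concatenation and repeats it size times (simpler; no per-pixel classification). Return values proved equal for all sizes.


-- ===== PORT A =====
def french_flag (size : Int) : List (Int × Int × Int) :=
  let third := PySem.Int.floordiv size 3
  (PySem.List.pyRange 0 size 1).foldl (fun pixels _y =>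
    (PySem.List.pyRange 0 size 1).foldl (fun pixels x =>
      if x < third then pixels ++ [(0, 35, 149)]
      else if x < 2 * third then pixels ++ [(255, 255, 255)]
      else pixels ++ [(237, 41, 57)]) pixels) []

-- ===== PORT B =====
-- B: one row by list repetition/concatenation, then the row repeated size times.
def french_flag_alt (size : Int) : List (Int × Int × Int) :=
  let third := PySem.Int.floordiv size 3
  let row := PySem.List.pyRepeat [(0, 35, 149)] third
    ++ PySem.List.pyRepeat [(255, 255, 255)] third
    ++ PySem.List.pyRepeat [(237, 41, 57)] (size - 2 * third)
  PySem.List.pyRepeat row size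

-- ===== PRECONDITION & SPEC =====
def Spec_french_flag (size : Int) (out : List (Int × Int × Int)) : Prop := out = french_flag_alt size
instance (size : Int) (out : List (Int × Int × Int)) : Decidable (Spec_french_flag size out) := by unfold Spec_french_flag; infer_instance

-- ===== CLAIM (what is proved, stated in full; the proofs are below) =====
def Claim_equal_french_flag : Prop := ∀ (size : Int), Dom_french_flag size → Spec_french_flag size (french_flag size)

-- ===== LEMMAS AND PROOFS =====

-- the pixel classifier of A, as a function of x
def pvColor (third x : Int) : Int × Int × Int :=
  if x < third then (0, 35, 149)
  else if x < 2 * third then (255, 255, 255)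
  else (237, 41, 57)

theorem pvMapConstRange {α : Type} (a b : Int) (f : Int → α) (v : α)
    (h : ∀ x, a ≤ x → x < b → f x = v) :
    (PySem.List.pyRange a b 1).map f = List.replicate (b - a).toNat v := by
  rw [List.map_congr_left (g := fun _ => v)
    (fun x hx => by rw [PySem.List.mem_pyRange_one] at hx; exact h x hx.1 hx.2)]
  rw [List.map_const', PySem.List.length_pyRange_one]

theorem pvFlatMapConst {α β : Type} (l : List α) (r : List β) :
    l.flatMap (fun _ => r) = (List.replicate l.length r).flatten := by
  induction l with
  | nil => rfl
  | cons x xs ih => simp [List.flatMap_cons, ih, List.replicate_succ]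

theorem pvRow_eq (size : Int) (h : 0 ≤ size) :
    (PySem.List.pyRange 0 size 1).map (pvColor (PySem.Int.floordiv size 3)) =
      PySem.List.pyRepeat [((0 : Int), (35 : Int), (149 : Int))] (PySem.Int.floordiv size 3)
      ++ PySem.List.pyRepeat [((255 : Int), (255 : Int), (255 : Int))] (PySem.Int.floordiv size 3)
      ++ PySem.List.pyRepeat [((237 : Int), (41 : Int), (57 : Int))]
          (size - 2 * PySem.Int.floordiv size 3) := by
  set t := PySem.Int.floordiv size 3 with ht
  have hb : t * 3 ≤ size ∧ size < (t + 1) * 3 :=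
    (PySem.Int.floordiv_eq_iff_of_pos (by norm_num)).1 ht.symm
  have ht0 : 0 ≤ t := by nlinarith [hb.1, hb.2]
  rw [PySem.List.pyRange_one_append 0 (2 * t) size (by omega) (by nlinarith [hb.1]),
      PySem.List.pyRange_one_append 0 t (2 * t) ht0 (by omega),
      List.map_append, List.map_append,
      PySem.List.pyRepeat_singleton, PySem.List.pyRepeat_singleton,
      PySem.List.pyRepeat_singleton, List.append_assoc]
  have e1 : t - 0 = t := by ring
  have e2 : 2 * t - t = t := by ring
  rw [pvMapConstRange 0 t _ _ (fun x h1 h2 => by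
        unfold pvColor; rw [if_pos h2]),
      pvMapConstRange t (2 * t) _ _ (fun x h1 h2 => by
        unfold pvColor; rw [if_neg (by omega), if_pos h2]),
      pvMapConstRange (2 * t) size _ _ (fun x h1 h2 => by
        unfold pvColor; rw [if_neg (by omega), if_neg (by omega)]),
      e1, e2, ← List.append_assoc]

-- ===== VERDICT (by name: the statement is the Claim_ definition above) =====
theorem french_flag_spec : Claim_equal_french_flag := by
  intro size _
  unfold Spec_french_flag french_flag french_flag_alt
  simp only []
  set t := PySem.Int.floordiv size 3 with ht
  by_cases h : 0 ≤ size
  · have hinner : ∀ (pixels : List (Int × Int × Int)),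
        (PySem.List.pyRange 0 size 1).foldl (fun pixels x =>
          if x < t then pixels ++ [(0, 35, 149)]
          else if x < 2 * t then pixels ++ [(255, 255, 255)]
          else pixels ++ [(237, 41, 57)]) pixels
        = pixels ++ (PySem.List.pyRange 0 size 1).map (pvColor t) := by
      intro pixels
      have hfun : (fun (pixels : List (Int × Int × Int)) x =>
          if x < t then pixels ++ [((0:Int), (35:Int), (149:Int))]
          else if x < 2 * t then pixels ++ [((255:Int), (255:Int), (255:Int))]
          else pixels ++ [((237:Int), (41:Int), (57:Int))])
          = fun pixels x => pixels ++ [pvColor t x] := by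
        funext acc x; unfold pvColor; split_ifs <;> rfl
      rw [hfun, PySem.List.foldl_append_singleton_eq_map]
    rw [PySem.List.foldl_congr_mem _ _
        (fun pixels _y => pixels ++ (PySem.List.pyRange 0 size 1).map (pvColor t)) []
        (fun acc y _ => hinner acc),
      PySem.List.foldl_append_eq_flatMap, List.nil_append,
      pvFlatMapConst, pvRow_eq size h, ← ht,
      PySem.List.length_pyRange_one]
    unfold PySem.List.pyRepeat
    norm_num
  · rw [PySem.List.pyRange_one_eq_nil (by omega)]
    unfold PySem.List.pyRepeat
    have : size.toNat = 0 := by omega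
    rw [this]
    rfl
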